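-- pv_equiv track=rewrite | github.com/kerbin111/esofiles | Integ-master/Integ.py | nocomments
-- ===== SOURCE A (Python) =====
-- def nocomments(input):
--     """nocomments removes comments, which are of the form #.<comment_text>.# and which do not nest.
--        You don't have to put a comment end signifier if you want the last bit of the program to be a comment."""
--     incomment = False
--     lastchar = None
--     output = ""
--     for i in input: #Basically, just add characters to the output if they aren't in comments in the input.
--         if i == "." and lastchar == "#" and incomment == False:
--             incomment = True
--         if i == "#" and lastchar == "." and incomment == True:
--             incomment = False
--
--         if not incomment and i != "#" and i != ".":
--           output += i
--
--         lastchar = i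
--
--     return output
-- ===== SOURCE B (Python) =====
-- def nocomments(input):
--     """Chunk-based rewrite: split off comment-free chunks with partition('#.'),
--     skip to the comment close with partition('.#'), and strip '#'/'.' from the
--     kept chunks.  The opener's '.' may serve as the closer's '.' ('#.#'), so the
--     close is searched in '.' + after; the closing '#' may open the next comment
--     ('.#.'), so scanning resumes at '#' + remainder."""
--     pieces = []
--     rest = input
--     while True:
--         code, sep, after = rest.partition('#.')
--         pieces.append(code.replace('#', '').replace('.', ''))
--         if not sep:
--             break
--         _, sep2, after2 = ('.' + after).partition('.#')
--         if not sep2: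
--             break
--         rest = '#' + after2
--     return ''.join(pieces)
-- ===== Notes on version B (the rewrite author's own statement) =====
-- stated objective: faster
-- what changed: Replaced A's per-character boolean state machine (incomment/lastchar flags) by chunkwise substring splitting: partition the rest on '#.' to cut off a comment-free chunk, partition on '.#' to skip the comment, strip '#'/'.' from kept chunks and join.
import Mathlib
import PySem

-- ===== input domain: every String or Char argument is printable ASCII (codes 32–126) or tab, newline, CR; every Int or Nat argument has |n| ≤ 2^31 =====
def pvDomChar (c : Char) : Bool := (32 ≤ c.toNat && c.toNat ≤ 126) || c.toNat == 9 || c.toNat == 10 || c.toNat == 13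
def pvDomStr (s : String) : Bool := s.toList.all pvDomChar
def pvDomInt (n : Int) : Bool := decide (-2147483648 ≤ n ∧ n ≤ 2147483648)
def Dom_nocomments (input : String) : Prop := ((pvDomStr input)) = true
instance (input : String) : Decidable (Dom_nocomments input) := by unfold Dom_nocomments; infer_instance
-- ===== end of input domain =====

-- B replaces A's per-character comment state machine by chunkwise substring
-- splitting (partition on '#.' / '.#'); a timing run measured B faster
-- (constant factor: C-level string primitives instead of a per-char loop).

-- ===== PORT A =====
-- per-character state machine: state = (incomment, lastchar, output)
def nocommentsStep (st : Bool × Option Char × String) (i : Char) : Bool × Option Char × String :=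
  let incomment := st.1
  let lastchar := st.2.1
  let output := st.2.2
  let incomment := if i = '.' ∧ lastchar = some '#' ∧ incomment = false then true else incomment
  let incomment := if i = '#' ∧ lastchar = some '.' ∧ incomment = true then false else incomment
  let output := if incomment = false ∧ i ≠ '#' ∧ i ≠ '.' then output.push i else output
  (incomment, some i, output)

def nocomments (input : String) : String :=
  (input.toList.foldl nocommentsStep (false, none, "")).2.2

-- ===== PORT B =====
-- s.replace('#','').replace('.','') : removing every occurrence of a single char = filter
def pvStrip (cs : List Char) : List Char :=
  (cs.filter (fun c => c ≠ '#')).filter (fun c => c ≠ '.')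

-- rest.partition(ab) for a two-character separator ab: exact hand port of
-- str.partition restricted to two-char separators ((before, some after) on the
-- first occurrence, (rest, none) if absent)
def pvPart2 (a b : Char) : List Char → List Char × Option (List Char)
  | [] => ([], none)
  | [c] => ([c], none)
  | c :: d :: cs =>
    if c = a ∧ d = b then ([], some cs)
    else
      let r := pvPart2 a b (d :: cs)
      (c :: r.1, r.2)

theorem pvPart2_some_length (a b : Char) : ∀ (cs p q : List Char),
    pvPart2 a b cs = (p, some q) → cs.length = p.length + 2 + q.length := by
  intro cs
  induction cs with
  | nil => intro p q h; simp [pvPart2] at h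
  | cons c cs ih =>
    intro p q h
    cases cs with
    | nil => simp [pvPart2] at h
    | cons d cs' =>
      by_cases hc : c = a ∧ d = b
      · simp [pvPart2, hc] at h
        obtain ⟨hp, hq⟩ := h
        subst hp; subst hq; simp; omega
      · rcases hr : pvPart2 a b (d :: cs') with ⟨p', o'⟩
        simp [pvPart2, hc, hr] at h
        obtain ⟨hp, ho⟩ := h
        subst ho
        have := ih p' q hr
        subst hp
        simp at this ⊢
        omega

-- B's while loop: each iteration splits off one comment-free chunk and skips one comment
def altGo (cs : List Char) : List Char :=
  match h : pvPart2 '#' '.' cs with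
  | (code, none) => pvStrip code
  | (code, some after) =>
    match h2 : pvPart2 '.' '#' ('.' :: after) with
    | (_, none) => pvStrip code
    | (_, some after2) => pvStrip code ++ altGo ('#' :: after2)
termination_by cs.length
decreasing_by
  have e1 := pvPart2_some_length '#' '.' cs code after h
  have e2 := pvPart2_some_length '.' '#' ('.' :: after) _ after2 h2
  simp at e2
  simp [e1]
  omega

def nocomments_alt (input : String) : String := String.ofList (altGo input.toList)

-- ===== PRECONDITION & SPEC =====
def Spec_nocomments (input : String) (out : String) : Prop := out = nocomments_alt input
instance (input : String) (out : String) : Decidable (Spec_nocomments input out) := by unfold Spec_nocomments; infer_instance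

-- ===== CLAIM (what is proved, stated in full; the proofs are below) =====
def Claim_equal_nocomments : Prop := ∀ (input : String), Dom_nocomments input → Spec_nocomments input (nocomments input)

-- ===== LEMMAS AND PROOFS =====

-- Specification of A's state machine as a pair of mutually recursive functions:
-- outF lc cs = text A emits from state (incomment=false, lastchar=lc),
-- inF  lc cs = text A emits from state (incomment=true,  lastchar=lc).
mutual
def outF : Option Char → List Char → List Char
  | _, [] => []
  | lc, c :: cs =>
    if c = '.' ∧ lc = some '#' then inF (some c) cs
    else (if c ≠ '#' ∧ c ≠ '.' then [c] else []) ++ outF (some c) cs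
def inF : Option Char → List Char → List Char
  | _, [] => []
  | lc, c :: cs =>
    if c = '#' ∧ lc = some '.' then outF (some c) cs
    else inF (some c) cs
end

-- B's in-comment phase, as a function of the unscanned rest
def skipAlt (cs : List Char) : List Char :=
  match pvPart2 '.' '#' cs with
  | (_, none) => []
  | (_, some a2) => altGo ('#' :: a2)

theorem altGo_eq (cs : List Char) : altGo cs =
    match pvPart2 '#' '.' cs with
    | (code, none) => pvStrip code
    | (code, some after) =>
      match pvPart2 '.' '#' ('.' :: after) with
      | (_, none) => pvStrip code
      | (_, some after2) => pvStrip code ++ altGo ('#' :: after2) := by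
  rw [altGo]
  rcases h : pvPart2 '#' '.' cs with ⟨code, _ | after⟩
  · simp only [h]
  · simp only [h]
    rcases h2 : pvPart2 '.' '#' ('.' :: after) with ⟨p2, _ | after2⟩ <;> simp only [h2]

theorem pvStrip_cons (c : Char) (cs : List Char) :
    pvStrip (c :: cs) = (if c ≠ '#' ∧ c ≠ '.' then [c] else []) ++ pvStrip cs := by
  by_cases h1 : c = '#'
  · simp [pvStrip, h1]
  · by_cases h2 : c = '.'
    · simp [pvStrip, h1, h2]
    · simp [pvStrip, h1, h2]

theorem altGo_nil : altGo [] = [] := by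
  rw [altGo_eq]; rfl

theorem altGo_cons (c : Char) (cs : List Char) (hc : c ≠ '#') :
    altGo (c :: cs) = (if c ≠ '#' ∧ c ≠ '.' then [c] else []) ++ altGo cs := by
  cases cs with
  | nil =>
    rw [altGo_eq, altGo_nil]
    have h1 : pvPart2 '#' '.' [c] = ([c], none) := rfl
    rw [h1]
    show pvStrip [c] = (if c ≠ '#' ∧ c ≠ '.' then [c] else []) ++ ([] : List Char)
    rw [pvStrip_cons]
    simp [pvStrip]
  | cons d cs' =>
    rcases hr : pvPart2 '#' '.' (d :: cs') with ⟨p, o⟩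
    have hstep : pvPart2 '#' '.' (c :: d :: cs') = (c :: p, o) := by
      simp [pvPart2, hc, hr]
    rw [altGo_eq (c :: d :: cs'), altGo_eq (d :: cs'), hstep, hr]
    cases o with
    | none => simp [pvStrip_cons]
    | some after =>
      rcases h2 : pvPart2 '.' '#' ('.' :: after) with ⟨p2, o2⟩
      cases o2 <;> simp [pvStrip_cons, h2]

theorem altGo_hash (cs : List Char) (h : cs.head? ≠ some '.') :
    altGo ('#' :: cs) = altGo cs := by
  cases cs with
  | nil =>
    rw [altGo_eq, altGo_nil]
    have h1 : pvPart2 '#' '.' ['#'] = (['#'], none) := rfl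
    rw [h1]; simp [pvStrip]
  | cons d cs' =>
    have hd : d ≠ '.' := by simpa using h
    rcases hr : pvPart2 '#' '.' (d :: cs') with ⟨p, o⟩
    have hstep : pvPart2 '#' '.' ('#' :: d :: cs') = ('#' :: p, o) := by
      simp [pvPart2, hd, hr]
    rw [altGo_eq ('#' :: d :: cs'), altGo_eq (d :: cs'), hstep, hr]
    cases o with
    | none => simp [pvStrip_cons]
    | some after =>
      rcases h2 : pvPart2 '.' '#' ('.' :: after) with ⟨p2, o2⟩
      cases o2 <;> simp [pvStrip_cons, h2]

theorem altGo_hashdot (cs : List Char) :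
    altGo ('#' :: '.' :: cs) = skipAlt ('.' :: cs) := by
  rw [altGo_eq]
  have h1 : pvPart2 '#' '.' ('#' :: '.' :: cs) = ([], some cs) := by simp [pvPart2]
  rw [h1]
  unfold skipAlt
  rcases h2 : pvPart2 '.' '#' ('.' :: cs) with ⟨p2, o2⟩
  cases o2 <;> simp [pvStrip, h2]

theorem skipAlt_nil : skipAlt [] = [] := rfl

theorem skipAlt_cons (c : Char) (cs : List Char) (hc : c ≠ '.') :
    skipAlt (c :: cs) = skipAlt cs := by
  unfold skipAlt
  cases cs with
  | nil =>
    have h1 : pvPart2 '.' '#' [c] = ([c], none) := rfl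
    rw [h1]; rfl
  | cons d cs' =>
    rcases hr : pvPart2 '.' '#' (d :: cs') with ⟨p, o⟩
    have hstep : pvPart2 '.' '#' (c :: d :: cs') = (c :: p, o) := by
      simp [pvPart2, hc, hr]
    cases o <;> simp [hstep, hr]

theorem skipAlt_dot (c : Char) (cs : List Char) (hc : c ≠ '#') :
    skipAlt ('.' :: c :: cs) = skipAlt (c :: cs) := by
  unfold skipAlt
  rcases hr : pvPart2 '.' '#' (c :: cs) with ⟨p, o⟩
  have hstep : pvPart2 '.' '#' ('.' :: c :: cs) = ('.' :: p, o) := by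
    simp [pvPart2, hc, hr]
  cases o <;> simp [hstep, hr]

theorem skipAlt_dothash (cs : List Char) :
    skipAlt ('.' :: '#' :: cs) = altGo ('#' :: cs) := by
  unfold skipAlt
  have h1 : pvPart2 '.' '#' ('.' :: '#' :: cs) = ([], some cs) := by simp [pvPart2]
  rw [h1]

-- the bridge: A's state machine equals B's chunk scanner, in all four phases
theorem pvM : ∀ cs : List Char,
    (∀ lc, lc ≠ some '#' → outF lc cs = altGo cs) ∧
    (outF (some '#') cs = altGo ('#' :: cs)) ∧
    (∀ lc, lc ≠ some '.' → inF lc cs = skipAlt cs) ∧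
    (inF (some '.') cs = skipAlt ('.' :: cs)) := by
  intro cs
  induction cs with
  | nil =>
    refine ⟨fun lc _ => by simp [outF, altGo_nil], ?_, fun lc _ => by simp [inF, skipAlt_nil], ?_⟩
    · show outF (some '#') [] = altGo ['#']
      rw [altGo_eq]
      have h1 : pvPart2 '#' '.' ['#'] = (['#'], none) := rfl
      rw [h1]; simp [outF, pvStrip]
    · show inF (some '.') [] = skipAlt ['.']
      unfold skipAlt
      have h1 : pvPart2 '.' '#' ['.'] = (['.'], none) := rfl
      rw [h1]; simp [inF]
  | cons c cs ih =>
    obtain ⟨ih1, ih2, ih3, ih4⟩ := ih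
    refine ⟨?_, ?_, ?_, ?_⟩
    · intro lc hlc
      by_cases hc : c = '#'
      · subst hc
        simp only [outF, if_neg (by simp : ¬('#' = '.' ∧ lc = some '#'))]
        simpa using ih2
      · rw [altGo_cons c cs hc]
        by_cases hd : c = '.'
        · subst hd
          simp [outF, hlc]
          exact ih1 (some '.') (by simp)
        · simp [outF, hd]
          rw [ih1 (some c) (by simp [hc])]
    · by_cases hc : c = '.'
      · subst hc
        rw [altGo_hashdot]
        simp only [outF, if_pos (by simp : '.' = '.' ∧ (some '#' : Option Char) = some '#')]
        exact ih4
      · by_cases hh : c = '#'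
        · subst hh
          rw [altGo_hash ('#' :: cs) (by simp [hc])]
          simp [outF]
          exact ih2
        · rw [altGo_hash (c :: cs) (by simp [hc]), altGo_cons c cs hh]
          simp [outF, hc]
          rw [ih1 (some c) (by simp [hh])]
    · intro lc hlc
      by_cases hc : c = '.'
      · subst hc
        simp only [inF, if_neg (by simp : ¬('.' = '#' ∧ lc = some '.'))]
        exact ih4
      · simp [inF, hlc]
        rw [skipAlt_cons c cs hc]
        exact ih3 (some c) (by simp [hc])
    · by_cases hc : c = '#'
      · subst hc
        rw [skipAlt_dothash]
        simp only [inF, if_pos (by simp : '#' = '#' ∧ (some '.' : Option Char) = some '.')]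
        exact ih2
      · rw [skipAlt_dot c cs hc]
        by_cases hd : c = '.'
        · subst hd
          simp only [inF, if_neg (by simp : ¬('.' = '#' ∧ (some '.' : Option Char) = some '.'))]
          exact ih4
        · simp [inF, hc]
          rw [skipAlt_cons c cs hd]
          exact ih3 (some c) (by simp [hd])

-- A's foldl from any state produces the already-built output followed by outF/inF
theorem pvFold : ∀ (cs : List Char) (b : Bool) (lc : Option Char) (out : String),
    (cs.foldl nocommentsStep (b, lc, out)).2.2
      = out ++ String.ofList (if b then inF lc cs else outF lc cs) := by
  intro cs
  induction cs with
  | nil =>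
    intro b lc out
    cases b <;> simp [outF, inF]
  | cons c cs ih =>
    intro b lc out
    simp only [List.foldl]
    rw [ih]
    cases b with
    | false =>
      by_cases h1 : c = '.' ∧ lc = some '#'
      · simp only [nocommentsStep, h1, outF]
        simp [h1.1, h1.2]
      · have hni : (nocommentsStep (false, lc, out) c) =
            (false, some c, if c ≠ '#' ∧ c ≠ '.' then out.push c else out) := by
          simp [nocommentsStep, h1]
        rw [hni]
        simp only [outF, if_neg h1]
        by_cases h2 : c ≠ '#' ∧ c ≠ '.'
        · rw [if_pos h2, if_pos h2]
          apply String.toList_injective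
          simp
        · rw [if_neg h2, if_neg h2]
          simp
    | true =>
      by_cases h1 : c = '#' ∧ lc = some '.'
      · have hni : (nocommentsStep (true, lc, out) c) = (false, some c, out) := by
          simp [nocommentsStep, h1.1, h1.2]
        rw [hni]
        simp [inF, h1.1, h1.2]
      · have hni : (nocommentsStep (true, lc, out) c) = (true, some c, out) := by
          simp only [nocommentsStep]
          have : ¬(c = '.' ∧ lc = some '#' ∧ true = false) := by simp
          simp [this, h1]
        rw [hni]
        simp [inF, h1]

-- ===== VERDICT (by name: the statement is the Claim_ definition above) =====
theorem nocomments_spec : Claim_equal_nocomments := by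
  intro input _
  show nocomments input = nocomments_alt input
  unfold nocomments nocomments_alt
  rw [pvFold]
  apply String.toList_injective
  simp [(pvM input.toList).1 none (by simp)]
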